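-- pv_equiv track=rewrite | github.com/GalWat/wms-graduate-work | tests/prepare.py | value_gen
-- ===== SOURCE A (Python) =====
-- def value_gen(width, height):
--     orientation = 2
--     for x in range(1, width):
--         if x % 3 == 0:
--             continue
--         orientation = 0 if orientation == 2 else 2
--
--         for y in range(1, height):
--             if y % 5 == 0:
--                 continue
--
--             yield x, y, orientation
-- ===== SOURCE B (Python) =====
-- def value_gen(width, height):
--     # Stateless: orientation of a valid x is determined by the parity of
--     # k = number of non-multiples of 3 in 1..x, which is x - x//3.
--     yield from ((x, y, 2 - 2 * ((x - x // 3) % 2))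
--                 for x in range(1, width) if x % 3 != 0
--                 for y in range(1, height) if y % 5 != 0)
-- ===== Notes on version B (the rewrite author's own statement) =====
-- stated objective: simpler
-- what changed: Replaced the mutable toggling orientation state with a closed-form orientation 2 - 2*((x - x//3) % 2) computed per x, turning the nested stateful loops into one stateless generator expression.
import Mathlib
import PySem

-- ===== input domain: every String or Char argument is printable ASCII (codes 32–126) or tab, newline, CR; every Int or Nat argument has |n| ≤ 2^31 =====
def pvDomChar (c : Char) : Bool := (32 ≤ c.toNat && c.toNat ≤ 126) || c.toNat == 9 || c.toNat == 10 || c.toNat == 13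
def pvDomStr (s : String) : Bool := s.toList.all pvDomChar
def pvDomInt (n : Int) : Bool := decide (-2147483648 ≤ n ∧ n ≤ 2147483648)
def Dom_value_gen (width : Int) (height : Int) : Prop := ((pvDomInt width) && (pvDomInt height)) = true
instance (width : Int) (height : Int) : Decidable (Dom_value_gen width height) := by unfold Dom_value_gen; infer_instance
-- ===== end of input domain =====

-- B replaces A's mutable toggling orientation state by the closed form 2 - 2*((x - x//3) % 2),
-- making the generator a single stateless comprehension (objective: simpler).


-- ===== PORT A =====
-- outer loop carries the mutable orientation together with the yielded output
def value_gen (width : Int) (height : Int) : List (Int × Int × Int) :=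
  ((PySem.List.pyRange 1 width 1).foldl (fun st x =>
    if PySem.Int.mod x 3 == 0 then st
    else
      let o : Int := if st.1 == 2 then 0 else 2
      (o, (PySem.List.pyRange 1 height 1).foldl (fun acc y =>
            if PySem.Int.mod y 5 == 0 then acc else acc ++ [(x, y, o)]) st.2))
    ((2 : Int), ([] : List (Int × Int × Int)))).2

-- ===== PORT B =====
def value_gen_alt (width : Int) (height : Int) : List (Int × Int × Int) :=
  ((PySem.List.pyRange 1 width 1).filter (fun x => !(PySem.Int.mod x 3 == 0))).flatMap
    (fun x =>
      ((PySem.List.pyRange 1 height 1).filter (fun y => !(PySem.Int.mod y 5 == 0))).map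
        (fun y => (x, y, 2 - 2 * PySem.Int.mod (x - PySem.Int.floordiv x 3) 2)))

-- ===== PRECONDITION & SPEC =====
def Spec_value_gen (width : Int) (height : Int) (out : List (Int × Int × Int)) : Prop := out = value_gen_alt width height
instance (width : Int) (height : Int) (out : List (Int × Int × Int)) : Decidable (Spec_value_gen width height out) := by unfold Spec_value_gen; infer_instance

-- ===== CLAIM (what is proved, stated in full; the proofs are below) =====
def Claim_equal_value_gen : Prop := ∀ (width : Int) (height : Int), Dom_value_gen width height → Spec_value_gen width height (value_gen width height)

-- ===== LEMMAS AND PROOFS =====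

-- the closed-form orientation after having processed all x ≤ t
def pvOrient (t : Int) : Int := 2 - 2 * PySem.Int.mod (t - PySem.Int.floordiv t 3) 2

lemma pvOrient_eq (t : Int) : pvOrient t = 2 - 2 * ((t - t / 3) % 2) := by
  unfold pvOrient
  rw [PySem.Int.floordiv_eq_ediv_of_pos (by omega), PySem.Int.mod_eq_emod_of_pos (by omega)]

lemma pvOrient_skip (x : Int) (hx : PySem.Int.mod x 3 = 0) : pvOrient x = pvOrient (x - 1) := by
  rw [PySem.Int.mod_eq_emod_of_pos (by omega)] at hx
  rw [pvOrient_eq, pvOrient_eq]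
  omega

lemma pvOrient_toggle (x : Int) (hx : ¬ PySem.Int.mod x 3 = 0) : pvOrient x = 2 - pvOrient (x - 1) := by
  rw [PySem.Int.mod_eq_emod_of_pos (by omega)] at hx
  rw [pvOrient_eq, pvOrient_eq]
  omega

lemma pvOrient_mem (t : Int) : pvOrient t = 0 ∨ pvOrient t = 2 := by
  rw [pvOrient_eq]
  omega

-- A's inner loop (skip multiples of 5, append) is filter-then-map
lemma pvInner_eq (x o h : Int) (acc : List (Int × Int × Int)) :
    (PySem.List.pyRange 1 h 1).foldl (fun acc y =>
        if PySem.Int.mod y 5 == 0 then acc else acc ++ [(x, y, o)]) acc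
      = acc ++ ((PySem.List.pyRange 1 h 1).filter (fun y => !(PySem.Int.mod y 5 == 0))).map
          (fun y => (x, y, o)) := by
  induction PySem.List.pyRange 1 h 1 generalizing acc with
  | nil => simp
  | cons y ys ih =>
    simp only [List.foldl_cons, List.filter_cons]
    by_cases hy : (PySem.Int.mod y 5 == 0) = true
    · simp only [hy, if_true, Bool.not_true, Bool.false_eq_true, if_false]
      exact ih acc
    · have hyv : (!(PySem.Int.mod y 5 == 0)) = true := by
        simp only [Bool.not_eq_true']; exact Bool.eq_false_iff.mpr hy
      rw [if_neg hy, if_pos hyv, ih]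
      simp

-- invariant of A's outer fold: the state orientation is pvOrient of the last processed x,
-- and the accumulated output is B's output for the processed prefix
lemma pvMain (h : Int) : ∀ (n : Nat),
    (PySem.List.pyRange 1 (1 + (n : Int)) 1).foldl (fun st x =>
      if PySem.Int.mod x 3 == 0 then st
      else
        let o : Int := if st.1 == 2 then 0 else 2
        (o, (PySem.List.pyRange 1 h 1).foldl (fun acc y =>
              if PySem.Int.mod y 5 == 0 then acc else acc ++ [(x, y, o)]) st.2))
      ((2 : Int), ([] : List (Int × Int × Int)))
    = (pvOrient (n : Int), value_gen_alt (1 + (n : Int)) h) := by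
  intro n
  induction n with
  | zero =>
    rw [show ((1:Int) + (0:Nat)) = 1 by norm_num,
        PySem.List.pyRange_one_eq_nil (le_refl (1:Int))]
    unfold value_gen_alt
    rw [PySem.List.pyRange_one_eq_nil (le_refl (1:Int))]
    simp [pvOrient, PySem.Int.mod, PySem.Int.floordiv]
  | succ m ih =>
    have hsplit : PySem.List.pyRange 1 (1 + ((m : Int) + 1)) 1
        = PySem.List.pyRange 1 (1 + (m : Int)) 1 ++ [1 + (m : Int)] := by
      have := PySem.List.pyRange_one_succ_right (a := 1) (b := 1 + (m : Int)) (by omega)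
      rw [show (1:Int) + ((m : Int) + 1) = (1 + (m : Int)) + 1 by ring]
      exact this
    push_cast
    rw [hsplit, List.foldl_append, ih]
    simp only [List.foldl_cons, List.foldl_nil]
    have hOr : pvOrient ((m : Int) + 1) = pvOrient (1 + (m : Int)) := by rw [add_comm]
    by_cases hx : (PySem.Int.mod (1 + (m : Int)) 3 == 0) = true
    · have hx' : PySem.Int.mod (1 + (m : Int)) 3 = 0 := by simpa using hx
      rw [if_pos hx]
      have horr : pvOrient ((m : Int)) = pvOrient (1 + (m : Int)) := by
        have := pvOrient_skip (1 + (m : Int)) hx'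
        rw [this]; norm_num
      have hB : value_gen_alt (1 + ((m : Int) + 1)) h = value_gen_alt (1 + (m : Int)) h := by
        unfold value_gen_alt
        rw [hsplit]
        have hxv : (!(PySem.Int.mod (1 + (m : Int)) 3 == 0)) = false := by
          simp only [Bool.not_eq_false']; exact hx
        simp only [List.filter_append, List.filter_cons, hxv, Bool.false_eq_true, if_false,
          List.filter_nil, List.flatMap_append, List.flatMap_nil, List.append_nil]
      rw [hB, hOr, horr]
    · have hx' : ¬ PySem.Int.mod (1 + (m : Int)) 3 = 0 := by simpa using hx
      rw [if_neg hx]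
      have horr : pvOrient (1 + (m : Int)) = 2 - pvOrient ((m : Int)) := by
        have := pvOrient_toggle (1 + (m : Int)) hx'
        rw [this]; norm_num
      have htog : (if ((pvOrient ((m : Int)), value_gen_alt (1 + (m : Int)) h).1 == 2) = true
            then (0:Int) else 2) = pvOrient (1 + (m : Int)) := by
        rcases pvOrient_mem ((m : Int)) with h0 | h2
        · simp [h0, horr]
        · simp [h2, horr]
      simp only [htog]
      rw [pvInner_eq]
      have hB : value_gen_alt (1 + ((m : Int) + 1)) h
          = value_gen_alt (1 + (m : Int)) h
            ++ ((PySem.List.pyRange 1 h 1).filter (fun y => !(PySem.Int.mod y 5 == 0))).map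
                (fun y => (1 + (m : Int), y, pvOrient (1 + (m : Int)))) := by
      -- B appends exactly this x's block at the right end of the range
        unfold value_gen_alt
        rw [hsplit]
        have hxv : (!(PySem.Int.mod (1 + (m : Int)) 3 == 0)) = true := by
          simp only [Bool.not_eq_true']; exact Bool.eq_false_iff.mpr hx
        simp only [List.filter_append, List.filter_cons, hxv, if_true,
          List.filter_nil, List.flatMap_append, List.flatMap_cons, List.flatMap_nil,
          List.append_nil, pvOrient]
      rw [hB, hOr]

-- ===== VERDICT (by name: the statement is the Claim_ definition above) =====
theorem value_gen_spec : Claim_equal_value_gen := by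
  intro width height _
  unfold Spec_value_gen value_gen
  by_cases hw : width ≤ 1
  · rw [PySem.List.pyRange_one_eq_nil hw]
    unfold value_gen_alt
    rw [PySem.List.pyRange_one_eq_nil hw]
    simp
  · have hn : width = 1 + ((width - 1).toNat : Int) := by omega
    rw [hn, pvMain height (width - 1).toNat]
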